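-- pv_equiv track=rewrite | github.com/kisssick0/tinkoffTask | decoder.py | decode_uleb128
-- ===== SOURCE A (Python) =====
-- num_of_bits = 8
--
-- def decode_uleb128(bin_part_of_payload: str) -> str:
--     str_ULEB128 = ''
--     for i in range(0, len(bin_part_of_payload), num_of_bits):  # отделяем байты для чтения
--         str_ULEB128 += bin_part_of_payload[i:i + num_of_bits]
--         if bin_part_of_payload[i] == '0':
--             break
--     decoded_bytes = []
--     for i in range(0, len(str_ULEB128), num_of_bits):  # байты в массив, убирая 1 старший бит
--         decoded_bytes.append(str_ULEB128[i + 1:i + num_of_bits])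
--     decoded_bytes.reverse()  # переписываем байты в массиве в реальном порядке
--     decoded_bytes = ''.join(decoded_bytes)
--     return decoded_bytes
-- ===== SOURCE B (Python) =====
-- num_of_bits = 8
--
-- def decode_uleb128(bin_part_of_payload: str) -> str:
--     # Locate the terminating byte by a single C-level search over the strided
--     # extract of the bytes' high bits, then assemble the result by pure index
--     # arithmetic over a descending range: no scan-and-break loop, no
--     # intermediate string, no list reversal.
--     s = bin_part_of_payload
--     heads = s[::num_of_bits]              # the leading bit of every byte
--     t = heads.find('0')                   # first terminating byte, -1 if none
--     k = t if t >= 0 else len(heads) - 1   # index of the last byte consumed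
--     return ''.join(s[num_of_bits * j + 1 : num_of_bits * j + num_of_bits]
--                    for j in range(k, -1, -1))
-- ===== Notes on version B (the rewrite author's own statement) =====
-- stated objective: alternative
-- what changed: B replaces A's scan-and-break loop over bytes plus a second re-chunking loop, list reversal and join with a loop-free scheme: one find() over the strided extract s[::8] of the bytes' leading bits locates the terminating byte, and the result is assembled by index arithmetic over a descending range, with no intermediate string and no reversal.
import Mathlib
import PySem

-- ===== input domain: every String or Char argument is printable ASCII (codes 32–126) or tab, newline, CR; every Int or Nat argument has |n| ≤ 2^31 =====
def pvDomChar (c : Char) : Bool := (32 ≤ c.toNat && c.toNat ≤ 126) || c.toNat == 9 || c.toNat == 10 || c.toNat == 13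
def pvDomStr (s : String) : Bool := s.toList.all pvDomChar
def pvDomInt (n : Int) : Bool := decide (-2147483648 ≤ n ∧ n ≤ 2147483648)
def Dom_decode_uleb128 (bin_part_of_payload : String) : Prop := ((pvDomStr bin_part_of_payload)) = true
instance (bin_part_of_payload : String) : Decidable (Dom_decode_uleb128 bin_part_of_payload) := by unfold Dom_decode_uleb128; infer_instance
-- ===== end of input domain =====

-- B locates the terminating byte with one find() over the strided extract s[::8] of the
-- bytes' leading bits and assembles the output by index arithmetic over a descending range,
-- instead of A's scan-and-break loop + intermediate string + re-chunking + reverse + join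
-- (objective: alternative).

-- ===== PORT A =====
-- first loop of A: for i in range(0, len(s), 8): str_ULEB128 += s[i:i+8]; if s[i] == '0': break
def aLoop1 (s : List Char) : List Int → List Char
  | [] => []
  | i :: rest =>
      let chunk := PySem.List.slice s (some i) (some (i + 8))
      if PySem.List.pyGet? s i = some '0' then chunk
      else chunk ++ aLoop1 s rest

def decode_uleb128 (bin_part_of_payload : String) : String :=
  let s := bin_part_of_payload.toList
  let strU := aLoop1 s (PySem.List.pyRange 0 (s.length : Int) 8)
  -- second loop: decoded_bytes.append(str_ULEB128[i+1:i+8]); then reverse and ''.join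
  let decoded := (PySem.List.pyRange 0 (strU.length : Int) 8).map
      (fun i => PySem.List.slice strU (some (i + 1)) (some (i + 8)))
  String.mk decoded.reverse.flatten

-- ===== PORT B =====
-- heads = s[::8]; t = heads.find('0'); k = t if t >= 0 else len(heads)-1;
-- ''.join(s[8*j+1:8*j+8] for j in range(k, -1, -1))
-- (s[::8] with constant step 8 ≠ 0 never fails in Python, so slice? is always some; .getD [] only discharges the option)
def bList (s : List Char) : List Char :=
  let heads := (PySem.List.slice? s none none 8).getD []
  let t := PySem.Chars.find heads ['0']
  let k := if 0 ≤ t then t else (heads.length : Int) - 1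
  ((PySem.List.pyRange k (-1) (-1)).map
      (fun j => PySem.List.slice s (some (8 * j + 1)) (some (8 * j + 8)))).flatten

def decode_uleb128_alt (bin_part_of_payload : String) : String :=
  String.mk (bList bin_part_of_payload.toList)

-- ===== PRECONDITION & SPEC =====
def Spec_decode_uleb128 (bin_part_of_payload : String) (out : String) : Prop := out = decode_uleb128_alt bin_part_of_payload
instance (bin_part_of_payload : String) (out : String) : Decidable (Spec_decode_uleb128 bin_part_of_payload out) := by unfold Spec_decode_uleb128; infer_instance

-- ===== CLAIM (what is proved, stated in full; the proofs are below) =====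
def Claim_equal_decode_uleb128 : Prop := ∀ (bin_part_of_payload : String), Dom_decode_uleb128 bin_part_of_payload → Spec_decode_uleb128 bin_part_of_payload (decode_uleb128 bin_part_of_payload)

-- ===== LEMMAS AND PROOFS =====

-- step-8 range facts (PySem only ships induction forms for step ±1)
theorem pyRange8_nil (a b : Int) (h : b ≤ a) : PySem.List.pyRange a b 8 = [] := by
  rw [PySem.List.pyRange_of_pos a b (by norm_num)]
  simp [show ¬ a < b by omega]

theorem pyRange8_cons (a b : Int) (h : a < b) :
    PySem.List.pyRange a b 8 = a :: PySem.List.pyRange (a + 8) b 8 := by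
  rw [PySem.List.pyRange_of_pos a b (by norm_num),
      PySem.List.pyRange_of_pos (a + 8) b (by norm_num)]
  have hcnt : (if a < b then ((b - a + 8 - 1) / 8).toNat else 0)
      = (if a + 8 < b then ((b - (a + 8) + 8 - 1) / 8).toNat else 0) + 1 := by
    by_cases h2 : a + 8 < b <;> simp [h, h2] <;> omega
  rw [hcnt, List.range_succ_eq_map, List.map_cons, List.map_map]
  congr 1
  · simp
  · apply List.map_congr_left
    intro k _
    simp only [Function.comp_apply]
    push_cast
    ring

theorem pyRange8_shift (b : Int) :
    PySem.List.pyRange 8 (8 + b) 8 = (PySem.List.pyRange 0 b 8).map (· + 8) := by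
  rw [PySem.List.pyRange_of_pos 8 (8 + b) (by norm_num),
      PySem.List.pyRange_of_pos 0 b (by norm_num)]
  have hcnt : (if (8:Int) < 8 + b then ((8 + b - 8 + 8 - 1) / 8).toNat else 0)
      = (if (0:Int) < b then ((b - 0 + 8 - 1) / 8).toNat else 0) := by
    by_cases hb : (0:Int) < b
    · rw [if_pos (by omega), if_pos hb]
      congr 2
      ring
    · rw [if_neg (by omega), if_neg hb]
  rw [hcnt, List.map_map]
  apply List.map_congr_left
  intro k _
  simp only [Function.comp_apply]
  ring

-- slicing with Nat-cast bounds
theorem slice_cast (u : List Char) (a b : Nat) :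
    PySem.List.slice u (some ((a : Int))) (some ((b : Int))) = (u.drop a).take (b - a) :=
  PySem.List.slice_natCast u a b

-- the 7-bit payload of the byte starting at position a
def piece (s : List Char) (a : Nat) : List Char := (s.drop (a + 1)).take 7

-- the common piece list, read off the input front-to-back
def pieces (s : List Char) (a : Nat) : List (List Char) :=
  if _h : a < s.length then
    if PySem.List.pyGet? s ((a : Int)) = some '0' ∨ s.length ≤ a + 8 then [piece s a]
    else piece s a :: pieces s (a + 8)
  else []
termination_by s.length - a
decreasing_by omega

-- A's second loop as a function of the intermediate string
def rechunk (u : List Char) : List (List Char) :=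
  (PySem.List.pyRange 0 ((u.length : Int)) 8).map
    (fun i => PySem.List.slice u (some (i + 1)) (some (i + 8)))

theorem rechunk_small (u : List Char) (h0 : 0 < u.length) (h8 : u.length ≤ 8) :
    rechunk u = [(u.drop 1).take 7] := by
  unfold rechunk
  rw [pyRange8_cons 0 (u.length : Int) (by exact_mod_cast h0),
      pyRange8_nil (0 + 8) (u.length : Int) (by exact_mod_cast h8)]
  simp only [List.map_cons, List.map_nil, zero_add]
  congr 1
  rw [show (1:Int) = ((1 : Nat) : Int) by norm_num,
      show (8:Int) = ((8 : Nat) : Int) by norm_num, slice_cast]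

theorem rechunk_cons (c u : List Char) (hc : c.length = 8) :
    rechunk (c ++ u) = c.drop 1 :: rechunk u := by
  unfold rechunk
  have hlen : (((c ++ u).length : Nat) : Int) = 8 + (u.length : Int) := by
    simp [hc]
  rw [hlen, pyRange8_cons 0 (8 + (u.length : Int)) (by positivity), zero_add,
      pyRange8_shift (u.length : Int)]
  simp only [List.map_cons, List.map_map]
  congr 1
  · -- head: (c ++ u)[1:8] = c.drop 1
    simp only [zero_add]
    rw [show (1:Int) = ((1 : Nat) : Int) by norm_num,
        show (8:Int) = ((8 : Nat) : Int) by norm_num, slice_cast]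
    rw [List.drop_append_of_le_length (by omega)]
    have h7 : (c.drop 1).length = 7 := by simp [hc]
    rw [show (8 : Nat) - 1 = 7 by norm_num,
        List.take_append_of_le_length (by omega), List.take_of_length_le (by omega)]
  · -- tail: shifted slices land in u
    apply List.map_congr_left
    intro i hi
    have hi0 : 0 ≤ i := by
      have := (PySem.List.mem_pyRange_iff_of_pos (a := 0) (b := (u.length : Int))
        (s := 8) (by norm_num) i).mp hi
      omega
    simp only [Function.comp_apply]
    obtain ⟨m, rfl⟩ : ∃ m : Nat, i = (m : Int) := ⟨i.toNat, by omega⟩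
    have e1 : ((m : Int) + 8 + 1) = ((m + 9 : Nat) : Int) := by push_cast; ring
    have e2 : ((m : Int) + 8 + 8) = ((m + 16 : Nat) : Int) := by push_cast; ring
    have e3 : ((m : Int) + 1) = ((m + 1 : Nat) : Int) := by push_cast; ring
    have e4 : ((m : Int) + 8) = ((m + 8 : Nat) : Int) := by push_cast; ring
    rw [e1, e2, e3, e4, slice_cast, slice_cast]
    have hdrop : (c ++ u).drop (m + 9) = u.drop (m + 1) := by
      rw [show m + 9 = c.length + (m + 1) by omega, List.drop_append,
          List.drop_eq_nil_of_le (by omega), List.nil_append]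
      congr 1
      omega
    rw [hdrop]
    congr 1
    omega

-- characterisation of A: re-chunking A's first loop yields the piece list
theorem rechunk_aLoop1 (s : List Char) (a : Nat) (ha : a < s.length) :
    rechunk (aLoop1 s (PySem.List.pyRange ((a : Int)) ((s.length : Int)) 8)) = pieces s a := by
  have hchunk : PySem.List.slice s (some ((a : Int))) (some ((a : Int) + 8))
      = (s.drop a).take 8 := by
    rw [show ((a : Int) + 8) = ((a + 8 : Nat) : Int) by push_cast; ring, slice_cast]
    congr 1
    omega
  have hchunklen : ((s.drop a).take 8).length = min 8 (s.length - a) := by simp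
  have hpiece : ((s.drop a).take 8).drop 1 = (s.drop (a + 1)).take 7 := by
    rw [List.drop_take, List.drop_drop]
  rw [pieces, dif_pos ha]
  rw [pyRange8_cons ((a : Int)) ((s.length : Int)) (by exact_mod_cast ha)]
  simp only [aLoop1, hchunk]
  by_cases h0 : PySem.List.pyGet? s ((a : Int)) = some '0'
  · rw [if_pos h0, if_pos (Or.inl h0)]
    rw [rechunk_small _ (by omega) (by omega), hpiece]
    rw [show ((s.drop (a + 1)).take 7).take 7 = (s.drop (a + 1)).take 7 by
          rw [List.take_take, min_self]]
    rfl
  · rw [if_neg h0]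
    by_cases h8 : a + 8 < s.length
    · rw [if_neg (by push_neg; exact ⟨h0, by omega⟩)]
      rw [rechunk_cons _ _ (by omega), hpiece,
          show ((a : Int) + 8) = ((a + 8 : Nat) : Int) by push_cast; ring,
          rechunk_aLoop1 s (a + 8) h8]
      rfl
    · rw [if_pos (Or.inr (by omega))]
      rw [pyRange8_nil ((a : Int) + 8) ((s.length : Int)) (by push_cast; omega)]
      simp only [aLoop1, List.append_nil]
      rw [rechunk_small _ (by omega) (by omega), hpiece,
          show ((s.drop (a + 1)).take 7).take 7 = (s.drop (a + 1)).take 7 by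
            rw [List.take_take, min_self]]
      rfl
termination_by s.length - a
decreasing_by omega


-- B-side lemmas ----------------------------------------------------------

theorem filterMap_eq_map_of_forall {A B : Type} (l : List A) (f : A → Option B) (g : A → B)
    (h : ∀ a ∈ l, f a = some (g a)) : l.filterMap f = l.map g := by
  induction l with
  | nil => rfl
  | cons x xs ih =>
      rw [List.filterMap_cons, h x (by simp), List.map_cons,
          ih (fun a ha => h a (by simp [ha]))]

-- heads = s[::8] is the strided extract of every 8th character
theorem heads_eq (s : List Char) :
    (PySem.List.slice? s none none 8).getD []
      = (List.range ((s.length + 7) / 8)).map (fun k => s.getD (8 * k) ' ') := by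
  have hidx : PySem.List.sliceIndices s.length none none 8 = (0, (s.length : Int), 8) := by
    simp [PySem.List.sliceIndices]
  simp only [PySem.List.slice?, if_neg (by norm_num : ¬(8:Int) = 0), hidx]
  have hc : (if (0:Int) < (s.length : Int) then (((s.length : Int) - 0 + 8 - 1) / 8).toNat else 0)
      = (s.length + 7) / 8 := by
    split_ifs with h
    · omega
    · omega
  rw [if_pos (by norm_num : (0:Int) < 8), hc, Option.getD_some]
  apply filterMap_eq_map_of_forall
  intro k hk
  rw [List.mem_range] at hk
  have h8 : 8 * k < s.length := by omega
  have hcast : ((0:Int) + 8 * (k : Int)).toNat = 8 * k := by omega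
  rw [hcast, List.getElem?_eq_getElem h8, List.getD_eq_getElem s ' ' h8]

theorem singleton_prefix_iff (l : List Char) (a : Char) : [a] <+: l ↔ l[0]? = some a := by
  cases l with
  | nil => simp
  | cons x xs =>
      constructor
      · rintro ⟨t, ht⟩
        rw [List.cons_append, List.nil_append] at ht
        cases ht
        simp
      · intro h
        simp only [List.getElem?_cons_zero, Option.some.injEq] at h
        subst h
        exact ⟨xs, rfl⟩

theorem singleton_infix_iff (l : List Char) (a : Char) : [a] <:+: l ↔ a ∈ l := by
  constructor
  · intro h
    exact h.subset (by simp)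
  · intro h
    obtain ⟨p, q, rfl⟩ := List.append_of_mem h
    exact ⟨p, q, by simp⟩

-- range(k, -1, -1) is the reverse of [0, …, k]
theorem pyRange_down (K : Nat) :
    PySem.List.pyRange ((K : Nat) : Int) (-1) (-1)
      = ((List.range' 0 (K + 1)).map (fun j : Nat => (j : Int))).reverse := by
  induction K with
  | zero =>
      rw [PySem.List.pyRange_neg_one_cons (by norm_num),
          PySem.List.pyRange_neg_one_eq_nil (by norm_num)]
      simp [List.range'_succ]
  | succ K ih =>
      rw [PySem.List.pyRange_neg_one_cons (by push_cast; omega)]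
      rw [show K + 1 + 1 = (K + 1) + 1 from rfl, List.range'_concat]
      rw [show (((K + 1 : Nat) : Nat) : Int) - 1 = ((K : Nat) : Int) by push_cast; ring, ih]
      simp

-- the piece list as an explicit range of byte indices, up to the terminating byte K
theorem pieces_eq_range' (s : List Char) (K : Nat) (hK : 8 * K < s.length)
    (h1 : ∀ j, j < K → PySem.List.pyGet? s (((8 * j : Nat) : Int)) ≠ some '0')
    (h2 : PySem.List.pyGet? s (((8 * K : Nat) : Int)) = some '0' ∨ s.length ≤ 8 * K + 8) :
    ∀ d i, i ≤ K → K - i = d →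
      pieces s (8 * i) = (List.range' i (K + 1 - i)).map (fun j => piece s (8 * j)) := by
  intro d
  induction d with
  | zero =>
      intro i hi hd
      have hiK : i = K := by omega
      rw [hiK, pieces, dif_pos (by omega), if_pos h2,
          show K + 1 - K = 1 by omega, List.range'_succ,
          show List.range' (K + 1) 0 = [] from rfl]
      rfl
  | succ d ih =>
      intro i hi hd
      have hiK : i < K := by omega
      rw [pieces, dif_pos (by omega),
          if_neg (by
            push_neg
            exact ⟨h1 i hiK, by omega⟩)]
      rw [show 8 * i + 8 = 8 * (i + 1) by ring, ih (i + 1) (by omega) (by omega)]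
      rw [show K + 1 - i = (K - i) + 1 by omega, List.range'_succ, List.map_cons]
      rw [show K + 1 - (i + 1) = K - i by omega]

theorem bList_nil : bList [] = [] := by decide

-- which index str.find('0') returns: either -1 and no '0' occurs, or the first '0'
theorem find_char_cases (l : List Char) :
    (PySem.Chars.find l ['0'] = -1 ∧ ∀ j, j < l.length → l[j]? ≠ some '0')
    ∨ (∃ k : Nat, PySem.Chars.find l ['0'] = ((k : Nat) : Int) ∧ k < l.length ∧ l[k]? = some '0'
        ∧ ∀ j, j < k → l[j]? ≠ some '0') := by
  by_cases ht : PySem.Chars.find l ['0'] = -1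
  · left
    refine ⟨ht, ?_⟩
    intro j hj hcontra
    exact ((PySem.Chars.find_eq_neg_one_iff _ _).mp ht)
      ((singleton_infix_iff _ _).mpr (List.mem_of_getElem? hcontra))
  · right
    have hfz : PySem.Chars.findFrom l ['0'] (((0:Nat) : Int)) = PySem.Chars.find l ['0'] := by
      norm_num [PySem.Chars.findFrom_zero]
    obtain ⟨hle, hpre, hmin⟩ :=
      PySem.Chars.findFrom_natCast_spec l ['0'] 0 (by omega) (by rw [hfz]; exact ht)
    rw [hfz] at hle hpre hmin
    have hle0 : 0 ≤ PySem.Chars.find l ['0'] := by exact_mod_cast hle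
    have h0 := (singleton_prefix_iff _ '0').mp hpre
    rw [List.getElem?_drop, Nat.add_zero] at h0
    refine ⟨(PySem.Chars.find l ['0']).toNat, (Int.toNat_of_nonneg hle0).symm,
      (List.getElem?_eq_some_iff.mp h0).1, h0, ?_⟩
    intro j hj
    have := hmin j (by omega) hj
    rwa [singleton_prefix_iff, List.getElem?_drop, Nat.add_zero] at this

-- characterisation of B on a nonempty input
theorem bList_eq_pieces (s : List Char) (hs : s ≠ []) :
    bList s = (pieces s 0).reverse.flatten := by
  have hn : 0 < s.length := List.length_pos_iff.mpr hs
  have hm1 : 1 ≤ (s.length + 7) / 8 := by omega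
  have hheads := heads_eq s
  have hlen : ((PySem.List.slice? s none none 8).getD []).length = (s.length + 7) / 8 := by
    rw [hheads]; simp
  have hgetj : ∀ j, j < (s.length + 7) / 8 →
      ((PySem.List.slice? s none none 8).getD [])[j]? = some (s.getD (8 * j) ' ') := by
    intro j hj
    rw [hheads, List.getElem?_map, List.getElem?_range hj, Option.map_some]
  have hget8 : ∀ j, j < (s.length + 7) / 8 →
      PySem.List.pyGet? s (((8 * j : Nat) : Int)) = some (s.getD (8 * j) ' ') := by
    intro j hj
    have h8 : 8 * j < s.length := by omega
    rw [PySem.List.pyGet?_natCast, List.getElem?_eq_getElem h8, List.getD_eq_getElem s ' ' h8]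
  -- the index K of the byte B stops at, with the facts pieces_eq_range' needs
  obtain ⟨K, hkval, hK8, h1, h2⟩ :
      ∃ K : Nat,
        (if 0 ≤ PySem.Chars.find ((PySem.List.slice? s none none 8).getD []) ['0']
          then PySem.Chars.find ((PySem.List.slice? s none none 8).getD []) ['0']
          else (((PySem.List.slice? s none none 8).getD []).length : Int) - 1) = ((K : Nat) : Int)
        ∧ 8 * K < s.length
        ∧ (∀ j, j < K → PySem.List.pyGet? s (((8 * j : Nat) : Int)) ≠ some '0')
        ∧ (PySem.List.pyGet? s (((8 * K : Nat) : Int)) = some '0' ∨ s.length ≤ 8 * K + 8) := by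
    rcases find_char_cases ((PySem.List.slice? s none none 8).getD []) with
      ⟨ht, hall⟩ | ⟨k, hk, hklt, hk0, hmin⟩
    · refine ⟨(s.length + 7) / 8 - 1, ?_, by omega, ?_, Or.inr (by omega)⟩
      · rw [if_neg (by rw [ht]; norm_num), hlen]
        omega
      · intro j hj
        rw [hget8 j (by omega)]
        intro hcontra
        have hne := hall j (by rw [hlen]; omega)
        rw [hgetj j (by omega), Option.some.inj hcontra] at hne
        exact hne rfl
    · have hkm : k < (s.length + 7) / 8 := by rw [← hlen]; exact hklt
      refine ⟨k, ?_, by omega, ?_, Or.inl ?_⟩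
      · rw [if_pos (by rw [hk]; exact Int.natCast_nonneg k), hk]
      · intro j hj
        rw [hget8 j (by omega)]
        intro hcontra
        have hne := hmin j hj
        rw [hgetj j (by omega), Option.some.inj hcontra] at hne
        exact hne rfl
      · rw [hget8 k hkm]
        rw [hgetj k hkm] at hk0
        exact hk0
  -- assemble both sides into the same reversed, flattened range of pieces
  have hA : pieces s 0 = (List.range' 0 (K + 1)).map (fun j => piece s (8 * j)) := by
    have h := pieces_eq_range' s K hK8 h1 h2 K 0 (by omega) (by omega)
    simpa using h
  simp only [bList]
  rw [hkval, pyRange_down K, hA, List.map_reverse, List.map_map]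
  congr 1
  apply congrArg
  apply List.map_congr_left
  intro j hj
  simp only [Function.comp_apply]
  rw [show 8 * ((j : Nat) : Int) + 1 = (((8 * j + 1 : Nat)) : Int) by push_cast; ring,
      show 8 * ((j : Nat) : Int) + 8 = (((8 * j + 8 : Nat)) : Int) by push_cast; ring,
      slice_cast]
  simp [piece, show 8 * j + 8 - (8 * j + 1) = 7 by omega]

-- unfolding port A
theorem decode_uleb128_eq (p : String) :
    decode_uleb128 p
      = String.mk ((rechunk (aLoop1 p.toList
          (PySem.List.pyRange 0 ((p.toList.length : Int)) 8))).reverse.flatten) := rfl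

-- ===== VERDICT (by name: the statement is the Claim_ definition above) =====
theorem decode_uleb128_spec : Claim_equal_decode_uleb128 := by
  unfold Claim_equal_decode_uleb128
  intro p _
  unfold Spec_decode_uleb128 decode_uleb128_alt
  rw [decode_uleb128_eq]
  by_cases hn : p.toList.length = 0
  · rw [List.length_eq_zero_iff] at hn
    rw [hn]
    simp only [List.length_nil, Nat.cast_zero, pyRange8_nil 0 0 le_rfl]
    simp [aLoop1, rechunk, pyRange8_nil 0 0 le_rfl, bList_nil]
  · have h0 : 0 < p.toList.length := by omega
    have hb := bList_eq_pieces p.toList (by intro h; rw [h] at h0; simp at h0)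
    rw [show ((0:Int)) = (((0:Nat) : Int)) from rfl,
        rechunk_aLoop1 p.toList 0 h0, hb]
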